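-- pv_equiv track=rewrite | github.com/scottstanie/sardem | sardem/upsample.py | _block_iterator
-- ===== SOURCE A (Python) =====
-- def _block_iterator(arr_shape, block_shape):
--     """Iterator to get indexes for accessing blocks of a raster
--
--     Args:
--         arr_shape = (num_rows, num_cols), full size of array to access
--         block_shape = (height, width), size of accessing blocks
--     Yields:
--         iterator: ((row_start, row_end), (col_start, col_end))
--
--     Notes:
--         If the block_shape/overlaps don't evenly divide the full arr_shape,
--         It will return the edges as smaller blocks, rather than skip them
--
--     Examples:
--     >>> list(_block_iterator((180, 250), (100, 100)))
--     [((0, 100), (0, 100)), ((0, 100), (100, 200)), ((0, 100), (200, 250)), \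
-- ((100, 180), (0, 100)), ((100, 180), (100, 200)), ((100, 180), (200, 250))]
--     """
--     rows, cols = arr_shape
--     row_off, col_off = 0, 0
--     height, width = block_shape
--
--     if height is None:
--         height = rows
--     if width is None:
--         width = cols
--
--     # Check we're not moving backwards with the overlap:
--     while row_off < rows:
--         while col_off < cols:
--             row_end = min(row_off + height, rows)  # Dont yield something OOB
--             col_end = min(col_off + width, cols)
--             yield ((row_off, row_end), (col_off, col_end))
--
--             col_off += width
--
--         row_off += height
--         col_off = 0
-- ===== SOURCE B (Python) =====
-- def _block_iterator(arr_shape, block_shape):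
--     """Flat-index arithmetic: one range over all nr*nc blocks, divmod recovers (i, j)."""
--     rows, cols = arr_shape
--     height, width = block_shape
--     if height is None:
--         height = rows
--     if width is None:
--         width = cols
--     nr = -(-rows // height)  # ceil-division block counts
--     nc = -(-cols // width)
--     for k in range(nr * nc):
--         i, j = divmod(k, nc)
--         r0 = i * height
--         c0 = j * width
--         yield ((r0, min(r0 + height, rows)), (c0, min(c0 + width, cols)))
-- ===== Notes on version B (the rewrite author's own statement) =====
-- stated objective: alternative
-- what changed: Replaces A's two nested while loops with mutable offset accumulation by a single flat loop over one range of nr*nc block indices, computing ceil-division block counts up front and recovering each block's (row, col) position with divmod and multiplication.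
-- outside the precondition, e.g. on _block_iterator((0, 5), (0, 2)): A returns [], B raises ZeroDivisionError; on _block_iterator((1, -7), (1, -8)): A returns [], B returns [((0, 1), (0, -8))]; on _block_iterator((3, 2), (-1, 1)): A does not finish within the time limit, B returns []
import Mathlib
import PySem

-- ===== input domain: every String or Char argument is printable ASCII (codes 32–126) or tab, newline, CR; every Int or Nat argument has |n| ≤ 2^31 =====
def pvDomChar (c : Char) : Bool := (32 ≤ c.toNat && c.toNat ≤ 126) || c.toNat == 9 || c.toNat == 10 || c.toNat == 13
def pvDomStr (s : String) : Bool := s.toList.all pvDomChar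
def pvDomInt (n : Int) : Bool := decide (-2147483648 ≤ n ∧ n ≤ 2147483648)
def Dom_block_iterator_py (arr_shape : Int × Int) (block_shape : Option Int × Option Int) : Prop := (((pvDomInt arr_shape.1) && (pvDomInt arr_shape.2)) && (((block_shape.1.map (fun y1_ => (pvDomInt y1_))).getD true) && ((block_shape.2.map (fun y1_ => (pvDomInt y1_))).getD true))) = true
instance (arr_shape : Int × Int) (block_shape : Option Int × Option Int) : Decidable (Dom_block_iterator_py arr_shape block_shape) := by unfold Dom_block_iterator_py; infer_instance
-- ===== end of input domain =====

-- B replaces A's nested while loops (mutable row/col offset accumulation) by a single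
-- flat loop over one range of nr*nc block indices, with block counts computed up front
-- by ceiling division and each block's position recovered by divmod; same blocks, same order.

-- ===== PORT A =====
-- inner `while col_off < cols` loop; the Nat argument is fuel only (one unit per
-- iteration; always sufficient on Pre_, where the loop makes at most cols iterations)
def pvInnerA (rows cols height width row_off : Int) : Nat → Int → List ((Int × Int) × (Int × Int))
  | 0, _ => []
  | n + 1, col_off =>
    if col_off < cols then
      ((row_off, min (row_off + height) rows), (col_off, min (col_off + width) cols))
        :: pvInnerA rows cols height width row_off n (col_off + width)
    else []

-- outer `while row_off < rows` loop (resets col_off to 0 each pass), fueled likewise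
def pvOuterA (rows cols height width : Int) : Nat → Int → List ((Int × Int) × (Int × Int))
  | 0, _ => []
  | n + 1, row_off =>
    if row_off < rows then
      pvInnerA rows cols height width row_off (cols.toNat + 1) 0
        ++ pvOuterA rows cols height width n (row_off + height)
    else []

def block_iterator_py (arr_shape : Int × Int) (block_shape : Option Int × Option Int) : List ((Int × Int) × (Int × Int)) :=
  let rows := arr_shape.1
  let cols := arr_shape.2
  let height := block_shape.1.getD rows   -- if height is None: height = rows
  let width := block_shape.2.getD cols    -- if width is None: width = cols
  pvOuterA rows cols height width (rows.toNat + 1) 0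

-- ===== PORT B =====
def block_iterator_py_alt (arr_shape : Int × Int) (block_shape : Option Int × Option Int) : List ((Int × Int) × (Int × Int)) :=
  let rows := arr_shape.1
  let cols := arr_shape.2
  let height := block_shape.1.getD rows
  let width := block_shape.2.getD cols
  let nr := -(PySem.Int.floordiv (-rows) height)   -- nr = -(-rows // height)
  let nc := -(PySem.Int.floordiv (-cols) width)    -- nc = -(-cols // width)
  (PySem.List.pyRange 0 (nr * nc) 1).map (fun k =>
    let i := PySem.Int.floordiv k nc               -- i, j = divmod(k, nc)
    let j := PySem.Int.mod k nc
    ((i * height, min (i * height + height) rows),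
     (j * width, min (j * width + width) cols)))

-- ===== PRECONDITION & SPEC =====
-- ceil(x/s) > 0, resp. ceil(x/s) < 0, as sign/magnitude conditions on the inputs
abbrev pvCeilPos (x s : Int) : Prop := (0 < x ∧ 0 < s) ∨ (x < 0 ∧ s < 0)
abbrev pvCeilNeg (x s : Int) : Prop := (0 < x ∧ s < 0 ∧ -s ≤ x) ∨ (x < 0 ∧ 0 < s ∧ s ≤ -x)

-- Pre_ keeps the natural domain (positive shape and block sizes) and, outside it, exactly
-- the degenerate inputs where both programs return []. Excluded are: zero effective block
-- sizes (B's division raises ZeroDivisionError while A returns [] or diverges), inputs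
-- where A diverges (a nonpositive step with area still ahead of the offset), and
-- negative-shape inputs where A's [] is an artefact of its `<` loop guards while B's
-- ceil-division counts are both positive or both negative and it emits bogus blocks.
def Pre_block_iterator_py (arr_shape : Int × Int) (block_shape : Option Int × Option Int) : Prop :=
  let rows := arr_shape.1
  let cols := arr_shape.2
  let h := block_shape.1.getD rows
  let w := block_shape.2.getD cols
  h ≠ 0 ∧ w ≠ 0 ∧
    ((0 < rows ∧ 0 < cols ∧ 0 < h ∧ 0 < w) ∨
     ((rows ≤ 0 ∨ (0 < h ∧ cols ≤ 0)) ∧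
      ¬(pvCeilPos rows h ∧ pvCeilPos cols w) ∧ ¬(pvCeilNeg rows h ∧ pvCeilNeg cols w)))

instance (arr_shape : Int × Int) (block_shape : Option Int × Option Int) : Decidable (Pre_block_iterator_py arr_shape block_shape) := by unfold Pre_block_iterator_py; infer_instance

def pvWitness_block_iterator_py : (Int × Int) × (Option Int × Option Int) := ((7, 5), (some 3, some 2))

def Spec_block_iterator_py (arr_shape : Int × Int) (block_shape : Option Int × Option Int) (out : List ((Int × Int) × (Int × Int))) : Prop := out = block_iterator_py_alt arr_shape block_shape
instance (arr_shape : Int × Int) (block_shape : Option Int × Option Int) (out : List ((Int × Int) × (Int × Int))) : Decidable (Spec_block_iterator_py arr_shape block_shape out) := by unfold Spec_block_iterator_py; infer_instance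

-- ===== CLAIM (what is proved, stated in full; the proofs are below) =====
def Claim_equal_block_iterator_py : Prop := ∀ (arr_shape : Int × Int) (block_shape : Option Int × Option Int), Dom_block_iterator_py arr_shape block_shape → Pre_block_iterator_py arr_shape block_shape → Spec_block_iterator_py arr_shape block_shape (block_iterator_py arr_shape block_shape)

-- ===== LEMMAS AND PROOFS =====

lemma pvRange_nil_of_pos {a b s : Int} (hs : 0 < s) (hba : b ≤ a) :
    PySem.List.pyRange a b s = [] := by
  rw [PySem.List.pyRange_of_pos a b hs]
  simp [if_neg (not_lt.mpr hba)]

lemma pvRange_cons_of_pos {a b s : Int} (hs : 0 < s) (hab : a < b) :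
    PySem.List.pyRange a b s = a :: PySem.List.pyRange (a + s) b s := by
  rw [PySem.List.pyRange_of_pos a b hs, PySem.List.pyRange_of_pos (a + s) b hs]
  rw [if_pos hab]
  by_cases h2 : a + s < b
  · rw [if_pos h2]
    have key : b - a + s - 1 = (b - (a + s) + s - 1) + 1 * s := by ring
    rw [key, Int.add_mul_ediv_right _ _ (by omega : s ≠ 0)]
    have hnn : 0 ≤ (b - (a + s) + s - 1) / s := Int.ediv_nonneg (by omega) (by omega)
    have hcnt : ((b - (a + s) + s - 1) / s + 1).toNat = ((b - (a + s) + s - 1) / s).toNat + 1 := by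
      omega
    rw [hcnt, List.range_succ_eq_map, List.map_cons, List.map_map]
    refine congrArg₂ _ (by simp) ?_
    refine List.map_congr_left (fun k _ => ?_)
    simp only [Function.comp_apply]
    push_cast
    ring
  · rw [if_neg h2]
    have key : b - a + s - 1 = (b - a - 1) + 1 * s := by ring
    rw [key, Int.add_mul_ediv_right _ _ (by omega : s ≠ 0),
      Int.ediv_eq_zero_of_lt (by omega) (by omega)]
    simp

lemma pvInnerA_eq (rows cols height width row_off : Int) (hw : 0 < width) :
    ∀ (n : Nat) (c : Int), (cols - c).toNat ≤ n →
      pvInnerA rows cols height width row_off n c =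
        (PySem.List.pyRange c cols width).map
          (fun cc => ((row_off, min (row_off + height) rows), (cc, min (cc + width) cols))) := by
  intro n
  induction n with
  | zero =>
    intro c hc
    rw [pvInnerA, pvRange_nil_of_pos hw (by omega)]
    simp
  | succ n ih =>
    intro c hc
    rw [pvInnerA]
    by_cases h : c < cols
    · rw [if_pos h, pvRange_cons_of_pos hw h, List.map_cons, ih (c + width) (by omega)]
    · rw [if_neg h, pvRange_nil_of_pos hw (by omega)]
      simp

lemma pvInnerA_nil (rows cols height width row_off : Int) (hc : cols ≤ 0) (n : Nat) :
    pvInnerA rows cols height width row_off n 0 = [] := by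
  cases n with
  | zero => rw [pvInnerA]
  | succ n => rw [pvInnerA, if_neg (by omega)]

lemma pvOuterA_eq (rows cols height width : Int) (hh : 0 < height)
    (hinner : ∀ r : Int, pvInnerA rows cols height width r (cols.toNat + 1) 0 =
      (PySem.List.pyRange 0 cols width).map
        (fun cc => ((r, min (r + height) rows), (cc, min (cc + width) cols)))) :
    ∀ (n : Nat) (r : Int), (rows - r).toNat ≤ n →
      pvOuterA rows cols height width n r =
        (PySem.List.pyRange r rows height).flatMap
          (fun rr => (PySem.List.pyRange 0 cols width).map
            (fun cc => ((rr, min (rr + height) rows), (cc, min (cc + width) cols)))) := by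
  intro n
  induction n with
  | zero =>
    intro r hr
    rw [pvOuterA, pvRange_nil_of_pos hh (by omega)]
    simp
  | succ n ih =>
    intro r hr
    rw [pvOuterA]
    by_cases h : r < rows
    · rw [if_pos h, pvRange_cons_of_pos hh h, List.flatMap_cons,
        ih (r + height) (by omega), hinner]
    · rw [if_neg h, pvRange_nil_of_pos hh (by omega)]
      simp

-- ceiling-division count brackets: q = -((-x)//s) satisfies (q-1)s < x ≤ qs (s>0), qs ≤ x < (q-1)s (s<0)
lemma pvCeil_bracket_pos (x s : Int) (hs : 0 < s) :
    ((-(PySem.Int.floordiv (-x) s)) - 1) * s < x ∧ x ≤ (-(PySem.Int.floordiv (-x) s)) * s :=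
  (PySem.Int.neg_floordiv_neg_eq_iff_of_pos (a := x) (b := s)
    (q := -(PySem.Int.floordiv (-x) s)) hs).mp rfl

lemma pvCeil_bracket_neg (x s : Int) (hs : s < 0) :
    (-(PySem.Int.floordiv (-x) s)) * s ≤ x ∧ x < ((-(PySem.Int.floordiv (-x) s)) - 1) * s := by
  have h1 := (PySem.Int.neg_floordiv_neg_eq_iff_of_pos (a := -x) (b := -s)
    (q := -(PySem.Int.floordiv (-x) s)) (by omega)).mp ?_
  · constructor <;> nlinarith [h1.1, h1.2]
  · rw [show -(-x) = x from by ring, ← PySem.Int.floordiv_neg_neg x (-s)]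
    simp

lemma pvCeil_pos_iff (x s : Int) (hs : s ≠ 0) :
    0 < -(PySem.Int.floordiv (-x) s) ↔ pvCeilPos x s := by
  unfold pvCeilPos
  rcases lt_or_gt_of_ne hs with hneg | hpos
  · obtain ⟨h1, h2⟩ := pvCeil_bracket_neg x s hneg
    constructor
    · intro h; right; constructor <;> nlinarith
    · rintro (⟨_, _⟩ | ⟨hx, _⟩); · omega
      by_contra h; push_neg at h; nlinarith
  · obtain ⟨h1, h2⟩ := pvCeil_bracket_pos x s hpos
    constructor
    · intro h; left; constructor <;> nlinarith
    · rintro (⟨hx, _⟩ | ⟨_, _⟩); swap; · omega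
      by_contra h; push_neg at h; nlinarith

lemma pvCeil_neg_iff (x s : Int) (hs : s ≠ 0) :
    -(PySem.Int.floordiv (-x) s) < 0 ↔ pvCeilNeg x s := by
  unfold pvCeilNeg
  rcases lt_or_gt_of_ne hs with hneg | hpos
  · obtain ⟨h1, h2⟩ := pvCeil_bracket_neg x s hneg
    constructor
    · intro h; left
      refine ⟨by nlinarith, hneg, by nlinarith⟩
    · rintro (⟨hx, _, hsx⟩ | ⟨_, hsp, _⟩); swap; · omega
      by_contra h; push_neg at h; nlinarith
  · obtain ⟨h1, h2⟩ := pvCeil_bracket_pos x s hpos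
    constructor
    · intro h; right
      refine ⟨by nlinarith, hpos, by nlinarith⟩
    · rintro (⟨_, hsn, _⟩ | ⟨hx, _, hsx⟩); · omega
      by_contra h; push_neg at h; nlinarith

-- step-s range as a multiple-map of a unit range over the ceiling count (0 < s)
lemma pvRange_step_eq (b s : Int) (hs : 0 < s) :
    PySem.List.pyRange 0 b s =
      (PySem.List.pyRange 0 (-(PySem.Int.floordiv (-b) s)) 1).map (· * s) := by
  set q := -(PySem.Int.floordiv (-b) s) with hq
  have hbr := (PySem.Int.neg_floordiv_neg_eq_iff_of_pos (a := b) (b := s) (q := q) hs).mp rfl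
  by_cases hb : 0 < b
  · have hq1 : 0 < q := by nlinarith [hbr.1, hbr.2]
    rw [PySem.List.pyRange_of_pos 0 b hs, if_pos hb, PySem.List.pyRange_one]
    have hcnt : b - 0 + s - 1 = (q - 1) * s + (b - (q - 1) * s + s - 1) := by ring
    have hdiv : (b - 0 + s - 1) / s = q := by
      have : (b - 0 + s - 1) = (b + s - 1 - q * s) + q * s := by ring
      rw [this, Int.add_mul_ediv_right _ _ (by omega : s ≠ 0),
        Int.ediv_eq_zero_of_lt (by nlinarith [hbr.1]) (by nlinarith [hbr.2])]
      omega
    rw [hdiv]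
    have : (q - 0).toNat = q.toNat := by omega
    rw [this, List.map_map]
    refine List.map_congr_left (fun k _ => ?_)
    simp [mul_comm]
  · have hq0 : q ≤ 0 := by nlinarith [hbr.1]
    rw [pvRange_nil_of_pos hs (by omega), PySem.List.pyRange_one_eq_nil (by omega)]
    simp

-- divmod split of a flat index range: range(m*n) indexed by (i, j) = divmod(k, n)
lemma pvRange_mul_split {α : Type} (f : Int → α) (m n : Int) (hn : 0 < n) :
    (PySem.List.pyRange 0 (m * n) 1).map f =
      (PySem.List.pyRange 0 m 1).flatMap
        (fun i => (PySem.List.pyRange 0 n 1).map (fun j => f (i * n + j))) := by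
  by_cases hm : 0 < m
  · -- induction over m.toNat
    have key : ∀ (a : Nat),
        (PySem.List.pyRange 0 ((a : Int) * n) 1).map f =
          (PySem.List.pyRange 0 (a : Int) 1).flatMap
            (fun i => (PySem.List.pyRange 0 n 1).map (fun j => f (i * n + j))) := by
      intro a
      induction a with
      | zero => simp [PySem.List.pyRange_one_eq_nil]
      | succ a ih =>
        have hsplit : PySem.List.pyRange 0 (((a : Int) + 1) * n) 1 =
            PySem.List.pyRange 0 ((a : Int) * n) 1 ++
              PySem.List.pyRange ((a : Int) * n) (((a : Int) + 1) * n) 1 :=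
          PySem.List.pyRange_one_append _ _ _ (by positivity) (by nlinarith)
        have hlast : (PySem.List.pyRange ((a : Int) * n) (((a : Int) + 1) * n) 1).map f =
            (PySem.List.pyRange 0 n 1).map (fun j => f ((a : Int) * n + j)) := by
          rw [PySem.List.pyRange_one, PySem.List.pyRange_one]
          have : ((a : Int) + 1) * n - (a : Int) * n = n - 0 := by ring
          rw [this, List.map_map, List.map_map]
          refine List.map_congr_left (fun k _ => ?_)
          simp
        have hr : PySem.List.pyRange 0 ((a : Int) + 1) 1 =
            PySem.List.pyRange 0 (a : Int) 1 ++ [(a : Int)] :=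
          PySem.List.pyRange_one_succ_right (by positivity)
        push_cast
        rw [hsplit, List.map_append, ih, hlast, hr, List.flatMap_append]
        simp
    have hm' : m = ((m.toNat : Nat) : Int) := by omega
    rw [hm']; exact key m.toNat
  · rw [PySem.List.pyRange_one_eq_nil (by omega : m ≤ (0:Int)),
      PySem.List.pyRange_one_eq_nil (by nlinarith : m * n ≤ (0:Int))]
    simp

lemma pvDivmod_exact (i j n : Int) (hn : 0 < n) (hj0 : 0 ≤ j) (hjn : j < n) :
    PySem.Int.floordiv (i * n + j) n = i ∧ PySem.Int.mod (i * n + j) n = j := by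
  have hd : PySem.Int.floordiv (i * n + j) n = i :=
    (PySem.Int.floordiv_eq_iff_of_pos (by omega)).mpr ⟨by nlinarith, by nlinarith⟩
  refine ⟨hd, ?_⟩
  have := PySem.Int.floordiv_mul_add_mod (i * n + j) n
  rw [hd] at this
  omega

lemma pvOuterA_nil_of_cols (rows cols h w : Int) (hh : 0 < h) (hc : cols ≤ 0) :
    ∀ (n : Nat) (r : Int), (rows - r).toNat ≤ n → pvOuterA rows cols h w n r = [] := by
  intro n
  induction n with
  | zero => intro r hr; rw [pvOuterA]
  | succ n ih =>
    intro r hr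
    rw [pvOuterA]
    by_cases hlt : r < rows
    · rw [if_pos hlt, pvInnerA_nil rows cols h w r hc, ih (r + h) (by omega)]
      rfl
    · rw [if_neg hlt]

-- A in canonical flatMap form (positive block sizes)
lemma pvA_canon (rows cols h w : Int) (hh : 0 < h) (hw : 0 < w) :
    pvOuterA rows cols h w (rows.toNat + 1) 0 =
      (PySem.List.pyRange 0 rows h).flatMap
        (fun rr => (PySem.List.pyRange 0 cols w).map
          (fun cc => ((rr, min (rr + h) rows), (cc, min (cc + w) cols)))) :=
  pvOuterA_eq rows cols h w hh
    (fun r => pvInnerA_eq rows cols h w r hw (cols.toNat + 1) 0 (by omega))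
    (rows.toNat + 1) 0 (by omega)

-- ===== VERDICT (by name: the statement is the Claim_ definition above) =====
theorem block_iterator_py_spec : Claim_equal_block_iterator_py := by
  intro arr_shape block_shape _ hpre
  unfold Spec_block_iterator_py block_iterator_py block_iterator_py_alt
  obtain ⟨rows, cols⟩ := arr_shape
  obtain ⟨oh, ow⟩ := block_shape
  simp only
  set h := oh.getD rows with hhdef
  set w := ow.getD cols with hwdef
  unfold Pre_block_iterator_py at hpre
  simp only at hpre
  rw [← hhdef, ← hwdef] at hpre
  obtain ⟨hh0, hw0, hmain | ⟨haempty, hnp, hnn⟩⟩ := hpre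
  · -- main case: everything positive
    obtain ⟨hr, hc, hhp, hwp⟩ := hmain
    set nr := -(PySem.Int.floordiv (-rows) h) with hnr
    set nc := -(PySem.Int.floordiv (-cols) w) with hnc
    have hncp : 0 < nc := (pvCeil_pos_iff cols w hw0).mpr (Or.inl ⟨hc, hwp⟩)
    rw [pvA_canon rows cols h w hhp hwp, pvRange_step_eq rows h hhp,
      pvRange_step_eq cols w hwp, ← hnr, ← hnc,
      pvRange_mul_split _ nr nc hncp, List.flatMap_map]
    refine List.flatMap_congr (fun i hi => ?_)
    rw [List.map_map]
    refine List.map_congr_left (fun j hj => ?_)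
    rw [PySem.List.mem_pyRange_one] at hj
    obtain ⟨hd, hm⟩ := pvDivmod_exact i j nc hncp hj.1 hj.2
    simp only [Function.comp_apply, hd, hm]
  · -- degenerate case: A returns [] and the flat index count nr*nc is ≤ 0
    set nr := -(PySem.Int.floordiv (-rows) h) with hnr
    set nc := -(PySem.Int.floordiv (-cols) w) with hnc
    have hprod : nr * nc ≤ 0 := by
      by_contra hcon
      push_neg at hcon
      rcases mul_pos_iff.mp hcon with ⟨h1, h2⟩ | ⟨h1, h2⟩
      · exact hnp ⟨(pvCeil_pos_iff rows h hh0).mp h1, (pvCeil_pos_iff cols w hw0).mp h2⟩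
      · exact hnn ⟨(pvCeil_neg_iff rows h hh0).mp h1, (pvCeil_neg_iff cols w hw0).mp h2⟩
    have hB : PySem.List.pyRange 0 (nr * nc) 1 = [] :=
      PySem.List.pyRange_one_eq_nil hprod
    rw [hB, List.map_nil]
    rcases haempty with hr | ⟨hhp, hc⟩
    · -- rows ≤ 0: the outer while never runs
      have : rows.toNat = 0 := by omega
      rw [this, pvOuterA, if_neg (by omega)]
    · -- 0 < h, cols ≤ 0: every inner pass is empty
      exact pvOuterA_nil_of_cols rows cols h w hhp hc (rows.toNat + 1) 0 (by omega)
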